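-- pv_equiv track=rewrite | github.com/tomasfarias/redtape | redtape/connectors.py | parse_acl
-- ===== SOURCE A (Python) =====
-- from typing import Iterator, Optional
--
-- def parse_acl(acl: Optional[str], sep: str = ",") -> Iterator[tuple[str, str, str]]:
--     """Iterate over a Redshift ACL string.
--
--     The ACL string is usually produced by appending the elements of an array
--     with a separator, which by default we assume it's ','.
--
--     Args:
--         acl (str): The Redshift ACL string.
--         sep (str): The separator used to join an ACL string.
--
--     Yields:
--         A tuple of the holder of an action, it's type ("user", or "group"),
--         and the action itself.
--     """
--     if acl is None:
--         return
--
--     stripped = acl.strip("{}")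
--
--     acl_strs = stripped.split(sep)
--
--     for acl_str in acl_strs:
--         acl_str, _, _ = acl_str.partition("/")
--         user_or_group, _, action_chars = acl_str.partition("=")
--
--         if user_or_group is None or user_or_group == "":
--             holder_name = "PUBLIC"
--             holder_type = "PUBLIC"
--         elif user_or_group.startswith("group"):
--             holder_name = user_or_group.split(" ")[1]
--             holder_type = "group"
--         else:
--             holder_name = user_or_group
--             holder_type = "user"
--
--         for idx, action_char in enumerate(action_chars):
--             if action_char == "*":
--                 continue
--
--             try:
--                 grant = action_chars[idx + 1]
--             except IndexError:
--                 pass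
--             else:
--                 if grant == "*":
--                     action_char += "*"
--
--             yield holder_name, holder_type, action_char
-- ===== SOURCE B (Python) =====
-- from typing import Iterator, Optional
--
--
-- def parse_acl(acl: Optional[str], sep: str = ",") -> Iterator[tuple[str, str, str]]:
--     """Iterate over a Redshift ACL string.
--
--     The action characters are scanned RIGHT-TO-LEFT with a carry flag: a '*'
--     sets the flag for the character to its left, so no index lookahead or
--     exception handling is needed; tokens are built back-to-front and reversed.
--     """
--     if acl is None:
--         return
--
--     for entry in acl.strip("{}").split(sep):
--         grantee, _, actions = entry.partition("/")[0].partition("=")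
--
--         if grantee == "":
--             name, kind = "PUBLIC", "PUBLIC"
--         elif grantee.startswith("group"):
--             name, kind = grantee.split(" ")[1], "group"
--         else:
--             name, kind = grantee, "user"
--
--         tokens = []
--         star = False
--         for c in reversed(actions):
--             if c == "*":
--                 star = True
--             else:
--                 tokens.append(c + ("*" if star else ""))
--                 star = False
--
--         for token in reversed(tokens):
--             yield name, kind, token
-- ===== Notes on version B (the rewrite author's own statement) =====
-- stated objective: alternative
-- what changed: A's index-based inner scan (enumerate with a try/except lookahead at idx+1) is replaced by a right-to-left traversal with a carry flag: a '*' sets the flag consumed by the character to its left, tokens are collected back-to-front and reversed, with no index arithmetic or exception handling.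
import Mathlib
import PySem

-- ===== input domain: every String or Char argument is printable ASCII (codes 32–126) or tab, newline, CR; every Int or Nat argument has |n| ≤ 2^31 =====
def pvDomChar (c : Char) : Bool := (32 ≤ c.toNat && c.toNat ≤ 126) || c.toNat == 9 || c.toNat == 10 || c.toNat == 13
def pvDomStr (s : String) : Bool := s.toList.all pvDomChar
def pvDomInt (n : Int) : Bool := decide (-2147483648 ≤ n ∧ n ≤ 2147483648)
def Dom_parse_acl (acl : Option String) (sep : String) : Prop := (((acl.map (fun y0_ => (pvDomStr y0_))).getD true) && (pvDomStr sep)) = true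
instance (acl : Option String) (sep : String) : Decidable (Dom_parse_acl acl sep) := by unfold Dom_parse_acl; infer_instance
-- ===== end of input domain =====

-- B replaces A's index-based inner scan (enumerate + try/except lookahead at idx+1) by a
-- right-to-left traversal with a carry flag, building the token list back-to-front
-- (objective: alternative; same cost).

-- str.partition(sep) for nonempty sep, ported by hand via PySem.Chars.find (exact: first
-- occurrence splits; no occurrence gives (s, "", "")). Used by both ports (both Pythons call it).
def pyPartition (s sep : List Char) : List Char × List Char × List Char :=
  let i := PySem.Chars.find s sep
  if i < 0 then (s, [], [])
  else (s.take i.toNat, sep, s.drop (i.toNat + sep.length))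

-- ===== PORT A =====
-- the inner 'for idx, action_char in enumerate(action_chars)' loop of A, as a named fold
def yieldActions (holder_name holder_type : String) (action_chars : List Char)
    (acc : List (String × String × String)) : List (String × String × String) :=
  (PySem.List.enumerate action_chars).foldl (fun acc p =>
    if p.2 = '*' then acc
    else
      match PySem.List.pyGet? action_chars (p.1 + 1) with
      | some grant =>
          acc ++ [(holder_name, holder_type,
                   String.ofList (if grant = '*' then [p.2, '*'] else [p.2]))]
      | none => acc ++ [(holder_name, holder_type, String.ofList [p.2])]) acc

def parse_acl (acl : Option String) (sep : String) : List (String × String × String) :=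
  match acl with
  | none => []
  | some a =>
    let stripped := PySem.Str.stripChars a "{}"
    -- split? is none iff the separator is empty (Python raises ValueError there; excluded by Pre_)
    let acl_strs := (PySem.Str.split? stripped sep).getD []
    acl_strs.foldl (fun acc acl_str =>
      let p1 := pyPartition acl_str.toList "/".toList
      let p2 := pyPartition p1.1 "=".toList
      let user_or_group := p2.1
      let action_chars := p2.2.2
      let hn_ht :=
        if user_or_group = [] then ("PUBLIC", "PUBLIC")
        else if PySem.Chars.startswith user_or_group "group".toList then
          -- second piece of the space-split: IndexError when absent; excluded by Pre_
          (String.ofList ((PySem.List.pyGet? (PySem.Chars.splitOn user_or_group " ".toList) 1).getD []),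
           "group")
        else (String.ofList user_or_group, "user")
      yieldActions hn_ht.1 hn_ht.2 action_chars acc) []

-- ===== PORT B =====
-- the 'for c in reversed(actions)' loop of Source B: carry flag + tokens appended back-to-front,
-- then 'for token in reversed(tokens)' yields them in order
def tokensRev (actions : List Char) (name kind : String) : List (String × String × String) :=
  let st := actions.reverse.foldl
    (fun (st : Bool × List String) c =>
      if c = '*' then (true, st.2)
      else (false, st.2 ++ [String.ofList (c :: (if st.1 then ['*'] else []))]))
    (false, [])
  st.2.reverse.map (fun t => (name, kind, t))

def parse_acl_alt (acl : Option String) (sep : String) : List (String × String × String) :=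
  match acl with
  | none => []
  | some a =>
    ((PySem.Str.split? (PySem.Str.stripChars a "{}") sep).getD []).flatMap (fun entry =>
      let p := pyPartition (pyPartition entry.toList "/".toList).1 "=".toList
      let grantee := p.1
      let nk :=
        if grantee = [] then ("PUBLIC", "PUBLIC")
        else if PySem.Chars.startswith grantee "group".toList then
          -- second piece of the space-split: IndexError when absent; excluded by Pre_
          (String.ofList ((PySem.List.pyGet? (PySem.Chars.splitOn grantee " ".toList) 1).getD []), "group")
        else (String.ofList grantee, "user")
      tokensRev p.2.2 nk.1 nk.2)

-- the grantee part of one ACL entry: entry.partition("/")[0].partition("=")[0]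
def granteeOf (e : String) : List Char :=
  (pyPartition (pyPartition e.toList "/".toList).1 "=".toList).1

-- ===== PRECONDITION & SPEC =====
-- Pre_ excludes exactly the inputs where the Python raises: an empty separator (ValueError
-- from str.split), and any entry whose grantee part has the group prefix but contains no
-- space (IndexError from the second-piece lookup). Both A and B raise there.
def Pre_parse_acl (acl : Option String) (sep : String) : Prop :=
  match acl with
  | none => True
  | some a =>
    sep ≠ "" ∧
    ∀ e ∈ (PySem.Str.split? (PySem.Str.stripChars a "{}") sep).getD [],
      PySem.Chars.startswith (granteeOf e) "group".toList = true →
        PySem.Chars.isIn [' '] (granteeOf e) = true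
instance (acl : Option String) (sep : String) : Decidable (Pre_parse_acl acl sep) := by
  unfold Pre_parse_acl; cases acl <;> infer_instance

def pvWitness_parse_acl : Option String × String :=
  (some "{alice=r*w/alice,group devs=arw*,=r}", ",")

def Spec_parse_acl (acl : Option String) (sep : String) (out : List (String × String × String)) : Prop := out = parse_acl_alt acl sep
instance (acl : Option String) (sep : String) (out : List (String × String × String)) : Decidable (Spec_parse_acl acl sep out) := by unfold Spec_parse_acl; infer_instance

-- ===== CLAIM (what is proved, stated in full; the proofs are below) =====
def Claim_equal_parse_acl : Prop := ∀ (acl : Option String) (sep : String), Dom_parse_acl acl sep → Pre_parse_acl acl sep → Spec_parse_acl acl sep (parse_acl acl sep)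

-- ===== LEMMAS AND PROOFS =====

-- proof-only intermediate form: A's tokens characterized by a one-step lookahead pairing
def tokensZip (actions : List Char) (name kind : String) : List (String × String × String) :=
  (actions.zip (actions.drop 1 ++ [' '])).filterMap (fun q =>
    if q.1 = '*' then none
    else some (name, kind, String.ofList (q.1 :: (if q.2 = '*' then ['*'] else []))))

-- A's indexed lookahead over a suffix equals the zip-with-successor characterization.
lemma yieldActions_go (name kind : String) :
    ∀ (suf pre : List Char) (acc : List (String × String × String)),
      (PySem.List.enumerate suf (pre.length : Int)).foldl (fun acc p =>
        if p.2 = '*' then acc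
        else
          match PySem.List.pyGet? (pre ++ suf) (p.1 + 1) with
          | some grant =>
              acc ++ [(name, kind, String.ofList (if grant = '*' then [p.2, '*'] else [p.2]))]
          | none => acc ++ [(name, kind, String.ofList [p.2])]) acc
      = acc ++ tokensZip suf name kind := by
  intro suf
  induction suf with
  | nil => intro pre acc; simp [PySem.List.enumerate_nil, tokensZip]
  | cons c rest ih =>
    intro pre acc
    have hidx : PySem.List.pyGet? (pre ++ c :: rest) ((pre.length : Int) + 1) = rest[0]? := by
      have : ((pre.length : Int) + 1) = ((pre.length + 1 : Nat) : Int) := by push_cast; ring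
      rw [this, PySem.List.pyGet?_natCast]
      rw [show pre ++ c :: rest = (pre ++ [c]) ++ rest by simp]
      rw [List.getElem?_append_right (by simp)]
      simp
    rw [PySem.List.enumerate_cons, List.foldl_cons]
    have step : ∀ acc', (PySem.List.enumerate rest ((pre.length : Int) + 1)).foldl (fun acc p =>
        if p.2 = '*' then acc
        else
          match PySem.List.pyGet? (pre ++ c :: rest) (p.1 + 1) with
          | some grant =>
              acc ++ [(name, kind, String.ofList (if grant = '*' then [p.2, '*'] else [p.2]))]
          | none => acc ++ [(name, kind, String.ofList [p.2])]) acc'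
        = acc' ++ tokensZip rest name kind := by
      intro acc'
      have := ih (pre ++ [c]) acc'
      simpa using this
    by_cases hc : c = '*'
    · rw [if_pos hc, step acc]
      subst hc
      cases rest with
      | nil => simp [tokensZip]
      | cons r rr => simp [tokensZip]
    · rw [if_neg hc, hidx]
      cases rest with
      | nil =>
        simp only [List.getElem?_nil]
        rw [step]
        simp [tokensZip, hc]
      | cons r rr =>
        simp only [List.getElem?_cons_zero]
        rw [step]
        by_cases hr : r = '*'
        · subst hr; simp [tokensZip, hc, List.append_assoc]
        · simp [tokensZip, hc, hr, List.append_assoc]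

lemma yieldActions_eq (name kind : String) (actions : List Char)
    (acc : List (String × String × String)) :
    yieldActions name kind actions acc = acc ++ tokensZip actions name kind := by
  have := yieldActions_go name kind actions [] acc
  simpa [yieldActions, PySem.List.enumerate] using this

-- the right-to-left carry scan, as a foldr (foldl over the reversed list)
def revScan (l : List Char) : Bool × List String :=
  l.foldr
    (fun c st =>
      if c = '*' then (true, st.2)
      else (false, st.2 ++ [String.ofList (c :: (if st.1 then ['*'] else []))]))
    (false, [])

-- invariant of the carry scan: the flag records whether the head is a star, and the
-- collected tokens are the zip-characterized tokens in reverse order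
lemma revScan_eq (name kind : String) (l : List Char) :
    revScan l = (decide (l.head? = some '*'),
                 ((tokensZip l name kind).map (fun t => t.2.2)).reverse) := by
  induction l with
  | nil => simp [revScan, tokensZip]
  | cons c rest ih =>
    by_cases hc : c = '*'
    · subst hc
      simp only [revScan, List.foldr_cons] at *
      rw [ih]
      cases rest with
      | nil => simp [tokensZip]
      | cons r rr => simp [tokensZip]
    · simp only [revScan, List.foldr_cons] at *
      rw [ih]
      cases rest with
      | nil => simp [tokensZip, hc]
      | cons r rr =>
        by_cases hr : r = '*'
        · subst hr; simp [tokensZip, hc]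
        · simp [tokensZip, hc, hr]

-- in tokensZip every emitted triple carries (name, kind)
lemma tokensZip_map (name kind : String) (l : List Char) :
    (tokensZip l name kind).map (fun t => (name, kind, t.2.2)) = tokensZip l name kind := by
  unfold tokensZip
  induction (l.zip (l.drop 1 ++ [' '])) with
  | nil => simp
  | cons q qs ih =>
    by_cases hq : q.1 = '*'
    · simp [hq, ih]
    · simp [hq, ih]

lemma tokensRev_eq (actions : List Char) (name kind : String) :
    tokensRev actions name kind = tokensZip actions name kind := by
  unfold tokensRev
  rw [List.foldl_reverse]
  have : (actions.foldr
      (fun c st =>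
        if c = '*' then (true, st.2)
        else (false, st.2 ++ [String.ofList (c :: (if st.1 then ['*'] else []))]))
      ((false, []) : Bool × List String)) = revScan actions := rfl
  rw [this, revScan_eq name kind]
  simp only [List.reverse_reverse, List.map_map]
  exact tokensZip_map name kind actions

-- ===== VERDICT (by name: the statement is the Claim_ definition above) =====
theorem parse_acl_spec : Claim_equal_parse_acl := by
  intro acl sep _ _
  unfold Spec_parse_acl parse_acl parse_acl_alt
  cases acl with
  | none => rfl
  | some a =>
    simp only
    generalize ((PySem.Str.split? (PySem.Str.stripChars a "{}") sep).getD []) = L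
    suffices h : ∀ (acc : List (String × String × String)),
        L.foldl (fun acc acl_str =>
          let p1 := pyPartition acl_str.toList "/".toList
          let p2 := pyPartition p1.1 "=".toList
          let user_or_group := p2.1
          let action_chars := p2.2.2
          let hn_ht :=
            if user_or_group = [] then ("PUBLIC", "PUBLIC")
            else if PySem.Chars.startswith user_or_group "group".toList then
              (String.ofList ((PySem.List.pyGet? (PySem.Chars.splitOn user_or_group " ".toList) 1).getD []),
               "group")
            else (String.ofList user_or_group, "user")
          yieldActions hn_ht.1 hn_ht.2 action_chars acc) acc
        = acc ++ L.flatMap (fun entry =>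
            let p := pyPartition (pyPartition entry.toList "/".toList).1 "=".toList
            let grantee := p.1
            let nk :=
              if grantee = [] then ("PUBLIC", "PUBLIC")
              else if PySem.Chars.startswith grantee "group".toList then
                (String.ofList ((PySem.List.pyGet? (PySem.Chars.splitOn grantee " ".toList) 1).getD []), "group")
              else (String.ofList grantee, "user")
            tokensRev p.2.2 nk.1 nk.2) by
      simpa using h []
    induction L with
    | nil => intro acc; simp
    | cons e es ih =>
      intro acc
      rw [List.foldl_cons, List.flatMap_cons, ih]
      simp only [yieldActions_eq, tokensRev_eq, List.append_assoc]
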